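-- pv_equiv track=rewrite | github.com/KMKHM/PS | jyp/0930/비밀번호발음하기.py | validation_continuous_word_3
-- ===== SOURCE A (Python) =====
-- vowel_list = ['a', 'e', 'i', 'o', 'u']
--
-- def validation_continuous_word_3(target):
--     vowel_count = 0
--     consonant_count = 0
--
--     for i in range(len(target)):
--         if target[i] in vowel_list:
--             vowel_count += 1
--             consonant_count = 0
--         else:
--             consonant_count += 1
--             vowel_count = 0
--
--         if vowel_count >= 3 or consonant_count >= 3:
--             return False
--     return True
-- ===== SOURCE B (Python) =====
-- def validation_continuous_word_3(target):
--     vowels = set('aeiou')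
--     cls = [c in vowels for c in target]
--     return not any(x == y == z for x, y, z in zip(cls, cls[1:], cls[2:]))
-- ===== Notes on version B (the rewrite author's own statement) =====
-- stated objective: idiomatic
-- what changed: Replaces the two reset-counters threaded through an index loop by a class list plus a sliding-window zip: the word is valid iff no window of three consecutive characters has the same vowel/consonant class.
import Mathlib
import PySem

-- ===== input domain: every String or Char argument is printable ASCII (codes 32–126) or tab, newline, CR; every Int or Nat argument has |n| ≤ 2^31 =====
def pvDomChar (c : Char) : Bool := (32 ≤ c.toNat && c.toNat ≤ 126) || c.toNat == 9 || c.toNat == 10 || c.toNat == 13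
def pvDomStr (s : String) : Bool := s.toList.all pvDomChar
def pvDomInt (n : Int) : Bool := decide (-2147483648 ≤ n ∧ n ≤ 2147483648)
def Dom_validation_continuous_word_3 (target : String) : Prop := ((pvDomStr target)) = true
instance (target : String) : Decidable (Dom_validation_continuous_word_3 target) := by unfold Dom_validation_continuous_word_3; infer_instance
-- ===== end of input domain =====

-- B replaces the two reset-counters of A by a vowel-class list scanned with a sliding
-- window of three (idiomatic zip-comprehension); return values are proved equal on Dom.

-- ===== PORT A =====
def pvVowelList : List Char := ['a', 'e', 'i', 'o', 'u']

-- the for-loop of A with its two counters and early return False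
def pvLoopA : List Char → Int → Int → Bool
  | [], _, _ => true
  | c :: rest, vowel_count, consonant_count =>
    let st :=
      if pvVowelList.contains c then (vowel_count + 1, (0 : Int))
      else ((0 : Int), consonant_count + 1)
    if 3 ≤ st.1 ∨ 3 ≤ st.2 then false
    else pvLoopA rest st.1 st.2

def validation_continuous_word_3 (target : String) : Bool :=
  pvLoopA target.toList 0 0

-- ===== PORT B =====
def pvIsVowel (c : Char) : Bool := pvVowelList.contains c   -- c in set('aeiou')

def pvCls (target : String) : List Bool := target.toList.map pvIsVowel

-- any(x == y == z for x, y, z in zip(cls, cls[1:], cls[2:]))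
def pvAny3 (cls : List Bool) : Bool :=
  (List.zipWith3 (fun x y z => x == y && y == z) cls (cls.drop 1) (cls.drop 2)).any id

def validation_continuous_word_3_alt (target : String) : Bool :=
  !(pvAny3 (pvCls target))

-- ===== PRECONDITION & SPEC =====
def Spec_validation_continuous_word_3 (target : String) (out : Bool) : Prop := out = validation_continuous_word_3_alt target
instance (target : String) (out : Bool) : Decidable (Spec_validation_continuous_word_3 target out) := by unfold Spec_validation_continuous_word_3; infer_instance

-- ===== CLAIM (what is proved, stated in full; the proofs are below) =====
def Claim_equal_validation_continuous_word_3 : Prop := ∀ (target : String), Dom_validation_continuous_word_3 target → Spec_validation_continuous_word_3 target (validation_continuous_word_3 target)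

-- ===== LEMMAS AND PROOFS =====

theorem pvAny3_cons3 (x y z : Bool) (r : List Bool) :
    pvAny3 (x :: y :: z :: r) = ((x == y && y == z) || pvAny3 (y :: z :: r)) := by
  simp [pvAny3, List.zipWith3]

theorem pvAny3_short (l : List Bool) (h : l.length ≤ 2) : pvAny3 l = false := by
  match l, h with
  | [], _ => rfl
  | [_], _ => rfl
  | [_, _], _ => rfl

-- dropping a leading element whose class differs from the next does not affect pvAny3
theorem pvAny3_drop_head (b b' : Bool) (l : List Bool) (h : b ≠ b') :
    pvAny3 (b :: b' :: l) = pvAny3 (b' :: l) := by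
  cases l with
  | nil => rfl
  | cons z r =>
    rw [pvAny3_cons3]
    have : (b == b') = false := by cases b <;> cases b' <;> simp_all
    simp [this]

-- invariant: the counters of A encode the length n (1 or 2) of the trailing run of class b
theorem pvLoop_eq_window : ∀ (l : List Char) (b : Bool) (n : Int), (n = 1 ∨ n = 2) →
    pvLoopA l (if b then n else 0) (if b then 0 else n) =
      !(pvAny3 (List.replicate n.toNat b ++ l.map pvIsVowel)) := by
  intro l
  induction l with
  | nil =>
    intro b n hn
    rcases hn with rfl | rfl <;> cases b <;> simp [pvLoopA, pvAny3_short]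
  | cons c r ih =>
    intro b n hn
    by_cases hc : pvIsVowel c = b
    · -- same class: run grows
      rcases hn with rfl | rfl
      · -- n = 1 → counters become 2
        have h2 := ih b 2 (Or.inr rfl)
        cases b <;> simp_all [pvLoopA, pvIsVowel, List.replicate]
      · -- n = 2 → three in a row: both sides false
        cases b <;> simp_all [pvLoopA, pvIsVowel, List.replicate, pvAny3_cons3]
    · -- class changes: run restarts at 1 with class pvIsVowel c
      have hb : b ≠ pvIsVowel c := fun h => hc h.symm
      have h1 := ih (pvIsVowel c) 1 (Or.inl rfl)
      have hdrop : pvAny3 (List.replicate n.toNat b ++ pvIsVowel c :: r.map pvIsVowel)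
          = pvAny3 (pvIsVowel c :: r.map pvIsVowel) := by
        rcases hn with rfl | rfl
        · simpa [List.replicate] using pvAny3_drop_head b (pvIsVowel c) _ hb
        · rw [show (2:Int).toNat = 2 from rfl]
          simp only [List.replicate, List.cons_append, List.nil_append]
          rw [show (b :: b :: pvIsVowel c :: r.map pvIsVowel)
                = b :: b :: pvIsVowel c :: r.map pvIsVowel from rfl]
          cases hr : r.map pvIsVowel with
          | nil =>
            rw [pvAny3_cons3]
            have : (b == pvIsVowel c) = false := by
              cases b <;> cases h : pvIsVowel c <;> simp_all
            simp [this, pvAny3_drop_head b (pvIsVowel c) [] hb]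
          | cons z r' =>
            rw [pvAny3_cons3]
            have : (b == pvIsVowel c) = false := by
              cases b <;> cases h : pvIsVowel c <;> simp_all
            simp [this, Bool.and_false, pvAny3_drop_head b (pvIsVowel c) (z :: r') hb]
      rcases hn with rfl | rfl <;> cases b <;> cases h : pvIsVowel c <;>
        simp_all [pvLoopA, pvIsVowel, List.replicate]

-- ===== VERDICT (by name: the statement is the Claim_ definition above) =====
theorem validation_continuous_word_3_spec : Claim_equal_validation_continuous_word_3 := by
  intro target _
  show validation_continuous_word_3 target = validation_continuous_word_3_alt target
  unfold validation_continuous_word_3 validation_continuous_word_3_alt pvCls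
  cases hl : target.toList with
  | nil => rfl
  | cons c r =>
    have h := pvLoop_eq_window r (pvIsVowel c) 1 (Or.inl rfl)
    cases hc : pvIsVowel c <;> simp_all [pvLoopA, pvIsVowel]
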